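-- pv_equiv track=rewrite | github.com/sangareshwari3110/Automated-License-Plate-Recognition-System | licenseplate.py | rect_intersects_segment
-- ===== SOURCE A (Python) =====
-- def on_segment(p, q, r):
--     # Check if q lies on pr (collinear and within bounding box)
--     if (min(p[0], r[0]) <= q[0] <= max(p[0], r[0]) and
--         min(p[1], r[1]) <= q[1] <= max(p[1], r[1])):
--         return True
--     return False
--
-- def orientation(p, q, r):
--     # Returns orientation of ordered triplet (p, q, r)
--     val = (q[1] - p[1]) * (r[0] - q[0]) - (q[0] - p[0]) * (r[1] - q[1])
--     if val == 0:
--         return 0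
--     return 1 if val > 0 else 2
--
-- def segments_intersect(p1, q1, p2, q2):
--     # General segment intersection test
--     o1 = orientation(p1, q1, p2)
--     o2 = orientation(p1, q1, q2)
--     o3 = orientation(p2, q2, p1)
--     o4 = orientation(p2, q2, q1)
--     if o1 != o2 and o3 != o4:
--         return True
--     if o1 == 0 and on_segment(p1, p2, q1):
--         return True
--     if o2 == 0 and on_segment(p1, q2, q1):
--         return True
--     if o3 == 0 and on_segment(p2, p1, q2):
--         return True
--     if o4 == 0 and on_segment(p2, q1, q2):
--         return True
--     return False
--
-- def rect_intersects_segment(rx1, ry1, rx2, ry2, sx1, sy1, sx2, sy2):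
--     # Normalize rect coordinates
--     left = min(rx1, rx2)
--     right = max(rx1, rx2)
--     top = min(ry1, ry2)
--     bottom = max(ry1, ry2)
--     # If either segment endpoint inside rect -> intersect
--     if left <= sx1 <= right and top <= sy1 <= bottom:
--         return True
--     if left <= sx2 <= right and top <= sy2 <= bottom:
--         return True
--     # Check intersection with any of the 4 rect sides
--     rect_edges = [
--         ((left, top), (right, top)),
--         ((right, top), (right, bottom)),
--         ((right, bottom), (left, bottom)),
--         ((left, bottom), (left, top))
--     ]
--     seg_p = (sx1, sy1)
--     seg_q = (sx2, sy2)
--     for (p, q) in rect_edges: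
--         if segments_intersect(p, q, seg_p, seg_q):
--             return True
--     return False
-- ===== SOURCE B (Python) =====
-- def rect_intersects_segment(rx1, ry1, rx2, ry2, sx1, sy1, sx2, sy2):
--     left, right = min(rx1, rx2), max(rx1, rx2)
--     top, bottom = min(ry1, ry2), max(ry1, ry2)
--
--     def inside(x, y):
--         return left <= x <= right and top <= y <= bottom
--
--     if inside(sx1, sy1) or inside(sx2, sy2):
--         return True
--
--     dx, dy = sx2 - sx1, sy2 - sy1
--
--     def crosses_h(k):
--         # does the segment meet the horizontal edge y = k, left <= x <= right?
--         if sy1 == sy2: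
--             return sy1 == k and min(sx1, sx2) <= right and max(sx1, sx2) >= left
--         if not (min(sy1, sy2) <= k <= max(sy1, sy2)):
--             return False
--         g0 = dx * (k - sy1) - dy * (left - sx1)
--         g1 = dx * (k - sy1) - dy * (right - sx1)
--         return min(g0, g1) <= 0 <= max(g0, g1)
--
--     def crosses_v(k):
--         # does the segment meet the vertical edge x = k, top <= y <= bottom?
--         if sx1 == sx2:
--             return sx1 == k and min(sy1, sy2) <= bottom and max(sy1, sy2) >= top
--         if not (min(sx1, sx2) <= k <= max(sx1, sx2)):
--             return False
--         g0 = dy * (k - sx1) - dx * (top - sy1)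
--         g1 = dy * (k - sx1) - dx * (bottom - sy1)
--         return min(g0, g1) <= 0 <= max(g0, g1)
--
--     return crosses_h(top) or crosses_h(bottom) or crosses_v(left) or crosses_v(right)
-- ===== Notes on version B (the rewrite author's own statement) =====
-- stated objective: simpler
-- what changed: B drops the generic CLRS orientation/on-segment segment-intersection machinery and instead tests each rectangle edge with a direct axis-aligned straddle test (parallel/overlap case plus sign straddle of two cross products against the slab boundaries).
import Mathlib
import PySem

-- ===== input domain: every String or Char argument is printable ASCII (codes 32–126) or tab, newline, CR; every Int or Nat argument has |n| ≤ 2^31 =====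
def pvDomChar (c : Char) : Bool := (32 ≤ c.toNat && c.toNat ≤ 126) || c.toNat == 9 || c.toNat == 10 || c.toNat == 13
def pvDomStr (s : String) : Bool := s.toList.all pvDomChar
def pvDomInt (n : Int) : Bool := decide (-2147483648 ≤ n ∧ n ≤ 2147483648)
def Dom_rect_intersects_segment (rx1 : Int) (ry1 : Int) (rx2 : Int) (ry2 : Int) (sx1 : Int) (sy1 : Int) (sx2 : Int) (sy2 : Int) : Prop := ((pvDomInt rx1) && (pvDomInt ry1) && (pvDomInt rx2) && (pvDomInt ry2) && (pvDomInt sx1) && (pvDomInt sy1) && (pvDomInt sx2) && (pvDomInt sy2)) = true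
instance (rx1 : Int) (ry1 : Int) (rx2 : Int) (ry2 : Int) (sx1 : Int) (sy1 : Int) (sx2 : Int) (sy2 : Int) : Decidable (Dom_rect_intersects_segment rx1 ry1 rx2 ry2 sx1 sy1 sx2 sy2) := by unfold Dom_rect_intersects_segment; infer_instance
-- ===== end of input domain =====

-- B replaces the generic CLRS orientation/on-segment machinery applied to each rectangle
-- edge by direct axis-aligned straddle tests per edge (objective: simpler).

-- ===== PORT A =====
def pvOnSegment (p : Int × Int) (q : Int × Int) (r : Int × Int) : Bool :=
  if min p.1 r.1 ≤ q.1 ∧ q.1 ≤ max p.1 r.1 ∧ min p.2 r.2 ≤ q.2 ∧ q.2 ≤ max p.2 r.2 then true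
  else false
def pvOrientation (p : Int × Int) (q : Int × Int) (r : Int × Int) : Int :=
  let val := (q.2 - p.2) * (r.1 - q.1) - (q.1 - p.1) * (r.2 - q.2)
  if val = 0 then 0 else if val > 0 then 1 else 2
def pvSegmentsIntersect (p1 : Int × Int) (q1 : Int × Int) (p2 : Int × Int) (q2 : Int × Int) : Bool :=
  let o1 := pvOrientation p1 q1 p2
  let o2 := pvOrientation p1 q1 q2
  let o3 := pvOrientation p2 q2 p1
  let o4 := pvOrientation p2 q2 q1
  if o1 ≠ o2 ∧ o3 ≠ o4 then true
  else if o1 = 0 ∧ pvOnSegment p1 p2 q1 = true then true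
  else if o2 = 0 ∧ pvOnSegment p1 q2 q1 = true then true
  else if o3 = 0 ∧ pvOnSegment p2 p1 q2 = true then true
  else if o4 = 0 ∧ pvOnSegment p2 q1 q2 = true then true
  else false

def rect_intersects_segment (rx1 : Int) (ry1 : Int) (rx2 : Int) (ry2 : Int) (sx1 : Int) (sy1 : Int) (sx2 : Int) (sy2 : Int) : Bool :=
  let left := min rx1 rx2
  let right := max rx1 rx2
  let top := min ry1 ry2
  let bottom := max ry1 ry2
  if left ≤ sx1 ∧ sx1 ≤ right ∧ top ≤ sy1 ∧ sy1 ≤ bottom then true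
  else if left ≤ sx2 ∧ sx2 ≤ right ∧ top ≤ sy2 ∧ sy2 ≤ bottom then true
  else
    let rectEdges : List ((Int × Int) × (Int × Int)) :=
      [((left, top), (right, top)), ((right, top), (right, bottom)),
       ((right, bottom), (left, bottom)), ((left, bottom), (left, top))]
    let segP := (sx1, sy1)
    let segQ := (sx2, sy2)
    rectEdges.any (fun pq => pvSegmentsIntersect pq.1 pq.2 segP segQ)

-- ===== PORT B =====
def pvCrossesH (left : Int) (right : Int) (sx1 : Int) (sy1 : Int) (sx2 : Int) (sy2 : Int) (dx : Int) (dy : Int) (k : Int) : Bool :=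
  if sy1 = sy2 then
    decide (sy1 = k ∧ min sx1 sx2 ≤ right ∧ left ≤ max sx1 sx2)
  else if ¬ (min sy1 sy2 ≤ k ∧ k ≤ max sy1 sy2) then false
  else
    let g0 := dx * (k - sy1) - dy * (left - sx1)
    let g1 := dx * (k - sy1) - dy * (right - sx1)
    decide (min g0 g1 ≤ 0 ∧ 0 ≤ max g0 g1)

def pvCrossesV (top : Int) (bottom : Int) (sx1 : Int) (sy1 : Int) (sx2 : Int) (sy2 : Int) (dx : Int) (dy : Int) (k : Int) : Bool :=
  if sx1 = sx2 then
    decide (sx1 = k ∧ min sy1 sy2 ≤ bottom ∧ top ≤ max sy1 sy2)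
  else if ¬ (min sx1 sx2 ≤ k ∧ k ≤ max sx1 sx2) then false
  else
    let g0 := dy * (k - sx1) - dx * (top - sy1)
    let g1 := dy * (k - sx1) - dx * (bottom - sy1)
    decide (min g0 g1 ≤ 0 ∧ 0 ≤ max g0 g1)

def rect_intersects_segment_alt (rx1 : Int) (ry1 : Int) (rx2 : Int) (ry2 : Int) (sx1 : Int) (sy1 : Int) (sx2 : Int) (sy2 : Int) : Bool :=
  let left := min rx1 rx2
  let right := max rx1 rx2
  let top := min ry1 ry2
  let bottom := max ry1 ry2
  let inside := fun (x y : Int) => decide (left ≤ x ∧ x ≤ right ∧ top ≤ y ∧ y ≤ bottom)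
  if inside sx1 sy1 || inside sx2 sy2 then true
  else
    let dx := sx2 - sx1
    let dy := sy2 - sy1
    pvCrossesH left right sx1 sy1 sx2 sy2 dx dy top ||
    pvCrossesH left right sx1 sy1 sx2 sy2 dx dy bottom ||
    pvCrossesV top bottom sx1 sy1 sx2 sy2 dx dy left ||
    pvCrossesV top bottom sx1 sy1 sx2 sy2 dx dy right

-- ===== PRECONDITION & SPEC =====
def Spec_rect_intersects_segment (rx1 : Int) (ry1 : Int) (rx2 : Int) (ry2 : Int) (sx1 : Int) (sy1 : Int) (sx2 : Int) (sy2 : Int) (out : Bool) : Prop := out = rect_intersects_segment_alt rx1 ry1 rx2 ry2 sx1 sy1 sx2 sy2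
instance (rx1 : Int) (ry1 : Int) (rx2 : Int) (ry2 : Int) (sx1 : Int) (sy1 : Int) (sx2 : Int) (sy2 : Int) (out : Bool) : Decidable (Spec_rect_intersects_segment rx1 ry1 rx2 ry2 sx1 sy1 sx2 sy2 out) := by unfold Spec_rect_intersects_segment; infer_instance

-- ===== CLAIM (what is proved, stated in full; the proofs are below) =====
def Claim_equal_rect_intersects_segment : Prop := ∀ (rx1 : Int) (ry1 : Int) (rx2 : Int) (ry2 : Int) (sx1 : Int) (sy1 : Int) (sx2 : Int) (sy2 : Int), Dom_rect_intersects_segment rx1 ry1 rx2 ry2 sx1 sy1 sx2 sy2 → Spec_rect_intersects_segment rx1 ry1 rx2 ry2 sx1 sy1 sx2 sy2 (rect_intersects_segment rx1 ry1 rx2 ry2 sx1 sy1 sx2 sy2)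

-- ===== LEMMAS AND PROOFS =====
def pvV (p : Int × Int) (q : Int × Int) (r : Int × Int) : Int :=
  (q.2 - p.2) * (r.1 - q.1) - (q.1 - p.1) * (r.2 - q.2)
def pvSS (v : Int) (w : Int) : Prop :=
  (v = 0 ∧ w = 0) ∨ (0 < v ∧ 0 < w) ∨ (v < 0 ∧ w < 0)
def pvOS (p : Int × Int) (q : Int × Int) (r : Int × Int) : Prop :=
  min p.1 r.1 ≤ q.1 ∧ q.1 ≤ max p.1 r.1 ∧ min p.2 r.2 ≤ q.2 ∧ q.2 ≤ max p.2 r.2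
lemma onseg_iff (p q r : Int × Int) : pvOnSegment p q r = true ↔ pvOS p q r := by
  unfold pvOnSegment pvOS; split_ifs with h
  · exact iff_of_true rfl h
  · exact iff_of_false (by simp) h
lemma orient_eq (p q r : Int × Int) :
    pvOrientation p q r = (if pvV p q r = 0 then (0:Int) else if pvV p q r > 0 then 1 else 2) := rfl
lemma code_eq_iff (v w : Int) :
    ((if v = 0 then (0:Int) else if v > 0 then 1 else 2) =
     (if w = 0 then (0:Int) else if w > 0 then 1 else 2)) ↔ pvSS v w := by
  unfold pvSS; split_ifs <;> constructor <;> intro h <;> omega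
lemma code_zero_iff (v : Int) :
    ((if v = 0 then (0:Int) else if v > 0 then 1 else 2) = 0) ↔ v = 0 := by
  split_ifs <;> constructor <;> intro h <;> omega
lemma ite_true_iff (c : Prop) [Decidable c] (b : Bool) :
    ((if c then true else b) = true) ↔ (c ∨ b = true) := by
  split_ifs with h
  · simp [h]
  · simp [h]
lemma segInt_iff (p1 q1 p2 q2 : Int × Int) :
    pvSegmentsIntersect p1 q1 p2 q2 = true ↔
      (¬ pvSS (pvV p1 q1 p2) (pvV p1 q1 q2) ∧ ¬ pvSS (pvV p2 q2 p1) (pvV p2 q2 q1)) ∨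
      (pvV p1 q1 p2 = 0 ∧ pvOS p1 p2 q1) ∨
      (pvV p1 q1 q2 = 0 ∧ pvOS p1 q2 q1) ∨
      (pvV p2 q2 p1 = 0 ∧ pvOS p2 p1 q2) ∨
      (pvV p2 q2 q1 = 0 ∧ pvOS p2 q1 q2) := by
  unfold pvSegmentsIntersect
  simp only [orient_eq, onseg_iff, ite_true_iff, Bool.false_eq_true, or_false]
  simp only [code_eq_iff, code_zero_iff, ne_eq]
lemma SS_neg (v w : Int) : pvSS (-v) (-w) ↔ pvSS v w := by
  unfold pvSS; constructor <;> intro h <;> omega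
lemma SS_refl (v : Int) : pvSS v v := by unfold pvSS; omega
lemma SS_comm (v w : Int) : pvSS v w ↔ pvSS w v := by unfold pvSS; tauto

lemma OS_sym (p q r : Int × Int) : pvOS p q r ↔ pvOS r q p := by
  unfold pvOS; omega
lemma pos_mul_nonneg (u v : Int) (hu : 0 < u) (h : 0 ≤ u * v) : 0 ≤ v := by
  by_contra hv
  push Not at hv
  nlinarith

lemma pos_mul_nonpos (u v : Int) (hu : 0 < u) (h : u * v ≤ 0) : v ≤ 0 := by
  by_contra hv
  push Not at hv
  nlinarith
-- if (x, k) lies on the line through (a,b)-(c,d) and k is between b and d (b ≠ d),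
-- then x is between a and c
lemma betweenX (a b c d x k : Int) (hbd : b ≠ d)
    (h1 : min b d ≤ k) (h2 : k ≤ max b d)
    (hg : (c - a) * (k - b) - (d - b) * (x - a) = 0) :
    min a c ≤ x ∧ x ≤ max a c := by
  have hid : (d - b) * (c - x) = (c - a) * (d - k) := by linear_combination hg
  rcases lt_or_gt_of_ne hbd with hlt | hlt
  · -- b < d, so b ≤ k ≤ d
    have hb : b ≤ k := by omega
    have hd : k ≤ d := by omega
    have hdy : 0 < d - b := by omega
    rcases le_total a c with hac | hac
    · -- dx ≥ 0 or ≤ 0? a ≤ c → c - a ≥ 0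
      have h3 : 0 ≤ (d - b) * (x - a) := by rw [← hg] at *; nlinarith
      have h4 : 0 ≤ (d - b) * (c - x) := by rw [hid]; nlinarith
      have := pos_mul_nonneg _ _ hdy h3
      have := pos_mul_nonneg _ _ hdy h4
      omega
    · have h3 : (d - b) * (x - a) ≤ 0 := by nlinarith
      have h4 : (d - b) * (c - x) ≤ 0 := by nlinarith
      have := pos_mul_nonpos _ _ hdy h3
      have := pos_mul_nonpos _ _ hdy h4
      omega
  · -- d < b
    have hb : k ≤ b := by omega
    have hd : d ≤ k := by omega
    have hdy : 0 < b - d := by omega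
    rcases le_total a c with hac | hac
    · have h3 : 0 ≤ (b - d) * (x - a) := by nlinarith
      have h4 : 0 ≤ (b - d) * (c - x) := by nlinarith
      have := pos_mul_nonneg _ _ hdy h3
      have := pos_mul_nonneg _ _ hdy h4
      omega
    · have h3 : (b - d) * (x - a) ≤ 0 := by nlinarith
      have h4 : (b - d) * (c - x) ≤ 0 := by nlinarith
      have := pos_mul_nonpos _ _ hdy h3
      have := pos_mul_nonpos _ _ hdy h4
      omega

lemma strnn (u v : Int) (h : ¬ pvSS u v) : min u v ≤ 0 ∧ 0 ≤ max u v := by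
  unfold pvSS at h; omega

lemma str_cases (u v : Int) (h : min u v ≤ 0 ∧ 0 ≤ max u v) : ¬ pvSS u v ∨ u = 0 ∨ v = 0 := by
  unfold pvSS; omega

lemma str_of_signs (u v : Int) (h : (0 ≤ u ∧ v ≤ 0) ∨ (u ≤ 0 ∧ 0 ≤ v)) :
    min u v ≤ 0 ∧ 0 ≤ max u v := by omega

lemma str_of_zero (u v : Int) (h : u = 0 ∨ v = 0) : min u v ≤ 0 ∧ 0 ≤ max u v := by omega

lemma pos_mul_pos (u v : Int) (hu : 0 < u) (h : 0 < u * v) : 0 < v := by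
  by_contra hv
  push Not at hv
  nlinarith
lemma coreH (x0 x1 k a b c d : Int) (hx : x0 ≤ x1) :
    pvSegmentsIntersect (x0, k) (x1, k) (a, b) (c, d) =
      pvCrossesH x0 x1 a b c d (c - a) (d - b) k := by
  rw [Bool.eq_iff_iff, segInt_iff]
  have e1 : pvV (x0, k) (x1, k) (a, b) = -((x1 - x0) * (b - k)) := by unfold pvV; ring
  have e2 : pvV (x0, k) (x1, k) (c, d) = -((x1 - x0) * (d - k)) := by unfold pvV; ring
  have e3 : pvV (a, b) (c, d) (x0, k) = -((c - a) * (k - b) - (d - b) * (x0 - a)) := by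
    unfold pvV; ring
  have e4 : pvV (a, b) (c, d) (x1, k) = -((c - a) * (k - b) - (d - b) * (x1 - a)) := by
    unfold pvV; ring
  rw [e1, e2, e3, e4]
  simp only [SS_neg, neg_eq_zero]
  unfold pvOS pvCrossesH
  simp only [min_self, max_self]
  rw [min_eq_left hx, max_eq_right hx]
  by_cases hbd : b = d
  · subst hbd
    rw [if_pos rfl]
    simp only [sub_self, zero_mul, sub_zero, min_self, max_self, decide_eq_true_eq]
    constructor
    · rintro (⟨h1, -⟩ | ⟨-, h⟩ | ⟨-, h⟩ | ⟨-, h⟩ | ⟨-, h⟩)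
      · exact absurd (SS_refl _) h1
      all_goals exact ⟨by omega, by omega, by omega⟩
    · rintro ⟨hbk, hov1, hov2⟩
      subst hbk
      have key : (x0 ≤ a ∧ a ≤ x1) ∨ (x0 ≤ c ∧ c ≤ x1) ∨
          (min a c ≤ x0 ∧ x0 ≤ max a c) ∨ (min a c ≤ x1 ∧ x1 ≤ max a c) := by omega
      have hP : (x1 - x0) * (b - b) = 0 := by ring
      have hG : (c - a) * (b - b) = 0 := by ring
      rcases key with h | h | h | h
      · exact Or.inr (Or.inl ⟨hP, h.1, h.2, le_refl _, le_refl _⟩)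
      · exact Or.inr (Or.inr (Or.inl ⟨hP, h.1, h.2, le_refl _, le_refl _⟩))
      · exact Or.inr (Or.inr (Or.inr (Or.inl ⟨hG, h.1, h.2, le_refl _, le_refl _⟩)))
      · exact Or.inr (Or.inr (Or.inr (Or.inr ⟨hG, h.1, h.2, le_refl _, le_refl _⟩)))
  · rw [if_neg hbd]
    by_cases hst : min b d ≤ k ∧ k ≤ max b d
    · rw [if_neg (by exact not_not_intro hst)]
      simp only [decide_eq_true_eq]
      by_cases hxx : x0 = x1
      · subst hxx
        have hP1 : (x0 - x0) * (b - k) = 0 := by ring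
        have hP2 : (x0 - x0) * (d - k) = 0 := by ring
        rw [hP1, hP2]
        simp only [min_self, max_self]
        constructor
        · rintro (⟨h1, -⟩ | ⟨-, h2, h3, h4, h5⟩ | ⟨-, h2, h3, h4, h5⟩ | ⟨hG, -⟩ | ⟨hG, -⟩)
          · exact absurd (SS_refl _) h1
          · have hG : (c - a) * (k - b) - (d - b) * (x0 - a) = 0 := by
              have ha : a = x0 := by omega
              have hb : b = k := by omega
              rw [ha, hb]; ring
            exact ⟨hG.le, hG.ge⟩
          · have hG : (c - a) * (k - b) - (d - b) * (x0 - a) = 0 := by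
              have hc : c = x0 := by omega
              have hd : d = k := by omega
              rw [hc, hd]; ring
            exact ⟨hG.le, hG.ge⟩
          · exact ⟨hG.le, hG.ge⟩
          · exact ⟨hG.le, hG.ge⟩
        · rintro ⟨h1, h2⟩
          have hG : (c - a) * (k - b) - (d - b) * (x0 - a) = 0 := by omega
          have hbet := betweenX a b c d x0 k hbd hst.1 hst.2 hG
          exact Or.inr (Or.inr (Or.inr (Or.inl ⟨hG, hbet.1, hbet.2, hst.1, hst.2⟩)))
      · have hXpos : 0 < x1 - x0 := by omega
        have hns : ¬ pvSS ((x1 - x0) * (b - k)) ((x1 - x0) * (d - k)) := by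
          unfold pvSS
          rintro (⟨h1, h2⟩ | ⟨h1, h2⟩ | ⟨h1, h2⟩)
          · rcases mul_eq_zero.mp h1 with h | h
            · omega
            · rcases mul_eq_zero.mp h2 with h' | h' <;> omega
          · have := pos_mul_pos _ _ hXpos h1
            have := pos_mul_pos _ _ hXpos h2
            omega
          · have h1' : 0 < (x1 - x0) * (k - b) := by nlinarith
            have h2' : 0 < (x1 - x0) * (k - d) := by nlinarith
            have := pos_mul_pos _ _ hXpos h1'
            have := pos_mul_pos _ _ hXpos h2'
            omega
        constructor
        · rintro (⟨-, h1⟩ | ⟨-, h2, h3, h4, h5⟩ | ⟨-, h2, h3, h4, h5⟩ | ⟨hG, -⟩ | ⟨hG, -⟩)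
          · exact strnn _ _ h1
          · have hb : b = k := by omega
            subst hb
            have i0 : (c - a) * (b - b) - (d - b) * (x0 - a) = (d - b) * (a - x0) := by ring
            have i1 : (c - a) * (b - b) - (d - b) * (x1 - a) = -((d - b) * (x1 - a)) := by ring
            rw [i0, i1]
            rcases lt_or_gt_of_ne (fun h => hbd h : b ≠ d) with hlt | hlt
            · refine str_of_signs _ _ (Or.inl ⟨?_, ?_⟩)
              · exact mul_nonneg (by omega) (by omega)
              · have : 0 ≤ (d - b) * (x1 - a) := mul_nonneg (by omega) (by omega)
                omega
            · refine str_of_signs _ _ (Or.inr ⟨?_, ?_⟩)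
              · have : 0 ≤ (d - b) * (x0 - a) := by
                  have := mul_nonneg (show (0:Int) ≤ b - d by omega) (show (0:Int) ≤ a - x0 by omega)
                  nlinarith
                omega
              · have : (d - b) * (x1 - a) ≤ 0 := by
                  have := mul_nonneg (show (0:Int) ≤ b - d by omega) (show (0:Int) ≤ x1 - a by omega)
                  nlinarith
                omega
          · have hd : d = k := by omega
            subst hd
            have i0 : (c - a) * (d - b) - (d - b) * (x0 - a) = (d - b) * (c - x0) := by ring
            have i1 : (c - a) * (d - b) - (d - b) * (x1 - a) = (d - b) * (c - x1) := by ring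
            rw [i0, i1]
            rcases lt_or_gt_of_ne (fun h => hbd h : b ≠ d) with hlt | hlt
            · refine str_of_signs _ _ (Or.inl ⟨?_, ?_⟩)
              · exact mul_nonneg (by omega) (by omega)
              · have := mul_nonneg (show (0:Int) ≤ d - b by omega) (show (0:Int) ≤ x1 - c by omega)
                nlinarith
            · refine str_of_signs _ _ (Or.inr ⟨?_, ?_⟩)
              · have := mul_nonneg (show (0:Int) ≤ b - d by omega) (show (0:Int) ≤ c - x0 by omega)
                nlinarith
              · have := mul_nonneg (show (0:Int) ≤ b - d by omega) (show (0:Int) ≤ x1 - c by omega)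
                nlinarith
          · exact str_of_zero _ _ (Or.inl hG)
          · exact str_of_zero _ _ (Or.inr hG)
        · intro h
          rcases str_cases _ _ h with hns3 | hG | hG
          · exact Or.inl ⟨hns, hns3⟩
          · have hbet := betweenX a b c d x0 k hbd hst.1 hst.2 hG
            exact Or.inr (Or.inr (Or.inr (Or.inl ⟨hG, hbet.1, hbet.2, hst.1, hst.2⟩)))
          · have hbet := betweenX a b c d x1 k hbd hst.1 hst.2 hG
            exact Or.inr (Or.inr (Or.inr (Or.inr ⟨hG, hbet.1, hbet.2, hst.1, hst.2⟩)))
    · rw [if_pos hst]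
      simp only [Bool.false_eq_true, iff_false]
      rintro (⟨h1, -⟩ | ⟨-, -, -, h4, h5⟩ | ⟨-, -, -, h4, h5⟩ | ⟨-, -, -, h4, h5⟩ | ⟨-, -, -, h4, h5⟩)
      · apply h1
        unfold pvSS
        rcases eq_or_lt_of_le hx with hxe | hxlt
        · left
          constructor <;> rw [← hxe] <;> ring
        · have hX : 0 < x1 - x0 := by omega
          rcases (show (b - k > 0 ∧ d - k > 0) ∨ (b - k < 0 ∧ d - k < 0) by omega) with ⟨h6, h7⟩ | ⟨h6, h7⟩
          · exact Or.inr (Or.inl ⟨mul_pos hX h6, mul_pos hX h7⟩)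
          · exact Or.inr (Or.inr ⟨mul_neg_of_pos_of_neg hX h6, mul_neg_of_pos_of_neg hX h7⟩)
      all_goals omega
lemma segswap (p1 q1 p2 q2 : Int × Int) :
    pvSegmentsIntersect p1 q1 p2 q2 = pvSegmentsIntersect q1 p1 p2 q2 := by
  rw [Bool.eq_iff_iff, segInt_iff, segInt_iff]
  rw [show pvV q1 p1 p2 = -pvV p1 q1 p2 from by unfold pvV; ring,
      show pvV q1 p1 q2 = -pvV p1 q1 q2 from by unfold pvV; ring]
  simp only [SS_neg, neg_eq_zero]
  rw [OS_sym q1 p2 p1, OS_sym q1 q2 p1,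
      show pvSS (pvV p2 q2 q1) (pvV p2 q2 p1) ↔ pvSS (pvV p2 q2 p1) (pvV p2 q2 q1) from
        SS_comm _ _]
  tauto
lemma segInt_swapxy (p1 q1 p2 q2 : Int × Int) :
    pvSegmentsIntersect (p1.2, p1.1) (q1.2, q1.1) (p2.2, p2.1) (q2.2, q2.1) =
      pvSegmentsIntersect p1 q1 p2 q2 := by
  rw [Bool.eq_iff_iff, segInt_iff, segInt_iff]
  rw [show pvV (p1.2, p1.1) (q1.2, q1.1) (p2.2, p2.1) = -pvV p1 q1 p2 from by unfold pvV; ring,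
      show pvV (p1.2, p1.1) (q1.2, q1.1) (q2.2, q2.1) = -pvV p1 q1 q2 from by unfold pvV; ring,
      show pvV (p2.2, p2.1) (q2.2, q2.1) (p1.2, p1.1) = -pvV p2 q2 p1 from by unfold pvV; ring,
      show pvV (p2.2, p2.1) (q2.2, q2.1) (q1.2, q1.1) = -pvV p2 q2 q1 from by unfold pvV; ring]
  simp only [SS_neg, neg_eq_zero]
  rw [show pvOS (p1.2, p1.1) (p2.2, p2.1) (q1.2, q1.1) ↔ pvOS p1 p2 q1 from by unfold pvOS; omega,
      show pvOS (p1.2, p1.1) (q2.2, q2.1) (q1.2, q1.1) ↔ pvOS p1 q2 q1 from by unfold pvOS; omega,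
      show pvOS (p2.2, p2.1) (p1.2, p1.1) (q2.2, q2.1) ↔ pvOS p2 p1 q2 from by unfold pvOS; omega,
      show pvOS (p2.2, p2.1) (q1.2, q1.1) (q2.2, q2.1) ↔ pvOS p2 q1 q2 from by unfold pvOS; omega]
lemma crossesV_eq_H (t bo x1 y1 x2 y2 dx dy k : Int) :
    pvCrossesV t bo x1 y1 x2 y2 dx dy k = pvCrossesH t bo y1 x1 y2 x2 dy dx k := rfl
lemma coreV (y0 y1 k a b c d : Int) (hy : y0 ≤ y1) :
    pvSegmentsIntersect (k, y0) (k, y1) (a, b) (c, d) =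
      pvCrossesV y0 y1 a b c d (c - a) (d - b) k := by
  have h := segInt_swapxy (y0, k) (y1, k) (b, a) (d, c)
  simp only at h
  rw [h, coreH y0 y1 k b a d c hy, crossesV_eq_H]

-- ===== VERDICT (by name: the statement is the Claim_ definition above) =====
theorem rect_intersects_segment_spec : Claim_equal_rect_intersects_segment := by
  intro rx1 ry1 rx2 ry2 sx1 sy1 sx2 sy2 _
  unfold Spec_rect_intersects_segment
  unfold rect_intersects_segment rect_intersects_segment_alt
  have hLR : min rx1 rx2 ≤ max rx1 rx2 := min_le_max
  have hTB : min ry1 ry2 ≤ max ry1 ry2 := min_le_max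
  by_cases h1 : min rx1 rx2 ≤ sx1 ∧ sx1 ≤ max rx1 rx2 ∧ min ry1 ry2 ≤ sy1 ∧ sy1 ≤ max ry1 ry2
  · simp [h1]
  · by_cases h2 : min rx1 rx2 ≤ sx2 ∧ sx2 ≤ max rx1 rx2 ∧ min ry1 ry2 ≤ sy2 ∧ sy2 ≤ max ry1 ry2
    · simp [h2]
    · simp only [List.any_cons, List.any_nil, Bool.or_false, h1, h2, decide_false,
        Bool.or_self, if_false]
      rw [segswap ((max rx1 rx2), (max ry1 ry2)) ((min rx1 rx2), (max ry1 ry2)),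
          segswap ((min rx1 rx2), (max ry1 ry2)) ((min rx1 rx2), (min ry1 ry2)),
          coreH (min rx1 rx2) (max rx1 rx2) (min ry1 ry2) sx1 sy1 sx2 sy2 hLR,
          coreH (min rx1 rx2) (max rx1 rx2) (max ry1 ry2) sx1 sy1 sx2 sy2 hLR,
          coreV (min ry1 ry2) (max ry1 ry2) (max rx1 rx2) sx1 sy1 sx2 sy2 hTB,
          coreV (min ry1 ry2) (max ry1 ry2) (min rx1 rx2) sx1 sy1 sx2 sy2 hTB]
      rw [Bool.eq_iff_iff]
      simp only [Bool.false_eq_true, if_false, Bool.or_eq_true]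
      tauto
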